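-- pv_equiv track=rewrite | github.com/Wonderwol/test_task1_calculator | calculator.py | format_for_history
-- ===== SOURCE A (Python) =====
-- def format_for_history(expr):
--     result = []
--     for i, ch in enumerate(expr):
--         if ch == "-" and (i == 0 or expr[i - 1] in "(*+-/"):
--             result.append(ch)
--         elif ch in "+-*/()":
--             result.append(f" {ch} ")
--         else:
--             result.append(ch)
--     return ' '.join(''.join(result).split())
-- ===== SOURCE B (Python) =====
-- def format_for_history(expr):
--     # single pass: build the token list directly with a buffer, instead of
--     # emitting padded fragments and re-splitting the joined string
--     tokens = []
--     buf = ""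
--     for i, ch in enumerate(expr):
--         if ch == "-" and (i == 0 or expr[i - 1] in "(*+-/"):
--             buf += ch
--         elif ch in "+-*/()":
--             if buf:
--                 tokens.append(buf)
--                 buf = ""
--             tokens.append(ch)
--         elif ch.isspace():
--             if buf:
--                 tokens.append(buf)
--                 buf = ""
--         else:
--             buf += ch
--     if buf:
--         tokens.append(buf)
--     return ' '.join(tokens)
-- ===== Notes on version B (the rewrite author's own statement) =====
-- stated objective: alternative
-- what changed: A pads each operator with spaces, concatenates all fragments and re-splits the joined string on whitespace; B never builds that intermediate string: a single pass over the characters maintains (tokens, buffer) state - unary minus extends the buffer, binary operators and whitespace flush it - and the token list is joined once; it trades A's three-stage string pipeline for an explicit tokenizer of similar size and cost.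
import Mathlib
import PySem

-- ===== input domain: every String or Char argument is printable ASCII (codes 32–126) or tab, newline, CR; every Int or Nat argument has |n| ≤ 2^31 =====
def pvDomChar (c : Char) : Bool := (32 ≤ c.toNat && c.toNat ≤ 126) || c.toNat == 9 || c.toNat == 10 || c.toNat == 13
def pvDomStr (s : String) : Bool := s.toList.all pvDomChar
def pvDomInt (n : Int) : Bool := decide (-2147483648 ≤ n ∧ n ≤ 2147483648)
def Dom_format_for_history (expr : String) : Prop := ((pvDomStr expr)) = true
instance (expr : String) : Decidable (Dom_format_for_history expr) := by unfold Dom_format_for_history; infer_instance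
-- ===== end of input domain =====

-- B replaces A's emit-padded-fragments-then-join-and-resplit pipeline by a single pass
-- that builds the token list directly with a buffer (objective: alternative - an explicit one-pass tokenizer instead of the string pipeline, same cost).

-- shared guard line "ch == '-' and (i == 0 or expr[i-1] in '(*+-/')" (identical in Source A and Source B);
-- in Python the 'i == 0' disjunct short-circuits the lookup, so the 'none' case is unreachable there
def fhUnary (cs : List Char) (i : Int) (ch : Char) : Bool :=
  ch == '-' && (i == 0 || (match PySem.List.pyGet? cs (i - 1) with
                           | some c => "(*+-/".toList.contains c
                           | none => false))

-- ===== PORT A =====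
-- the string A's loop body appends for one (i, ch)
def fhPiece (cs : List Char) (i : Int) (ch : Char) : List Char :=
  if fhUnary cs i ch then [ch]
  else if "+-*/()".toList.contains ch then [' ', ch, ' ']
  else [ch]

def format_for_history (expr : String) : String :=
  let cs := expr.toList
  let result := (PySem.List.enumerate cs 0).foldl
    (fun (acc : List (List Char)) p => acc ++ [fhPiece cs p.1 p.2]) []
  String.mk (PySem.Chars.join [' '] (PySem.Chars.split₀ (PySem.Chars.join [] result)))

-- ===== PORT B =====
-- Source B's loop body: state = (tokens, buf)
def fhStep (cs : List Char) (st : List (List Char) × List Char) (p : Int × Char) :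
    List (List Char) × List Char :=
  if fhUnary cs p.1 p.2 then (st.1, st.2 ++ [p.2])
  else if "+-*/()".toList.contains p.2 then
    (if st.2.isEmpty then st.1 ++ [[p.2]] else st.1 ++ [st.2, [p.2]], [])
  else if PySem.Chars.isspace p.2 then
    (if st.2.isEmpty then st.1 else st.1 ++ [st.2], [])
  else (st.1, st.2 ++ [p.2])

def format_for_history_alt (expr : String) : String :=
  let cs := expr.toList
  let st := (PySem.List.enumerate cs 0).foldl (fhStep cs) ([], [])
  let tokens := if st.2.isEmpty then st.1 else st.1 ++ [st.2]
  String.mk (PySem.Chars.join [' '] tokens)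

-- ===== PRECONDITION & SPEC =====
def Spec_format_for_history (expr : String) (out : String) : Prop := out = format_for_history_alt expr
instance (expr : String) (out : String) : Decidable (Spec_format_for_history expr out) := by unfold Spec_format_for_history; infer_instance

-- ===== CLAIM (what is proved, stated in full; the proofs are below) =====
def Claim_equal_format_for_history : Prop := ∀ (expr : String), Dom_format_for_history expr → Spec_format_for_history expr (format_for_history expr)

-- ===== LEMMAS AND PROOFS =====

-- the whitespace-split state machine hidden inside split₀.go
def wsT (st : List (List Char) × List Char) (c : Char) : List (List Char) × List Char :=
  if PySem.Chars.isspace c then (if st.2.isEmpty then st.1 else st.1 ++ [st.2], [])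
  else (st.1, st.2 ++ [c])

def wsFinish (st : List (List Char) × List Char) : List (List Char) :=
  if st.2.isEmpty then st.1 else st.1 ++ [st.2]

-- forward-buffer form of split₀
def wsW (s : List Char) (buf : List Char) : List (List Char) :=
  match s with
  | [] => if buf.isEmpty then [] else [buf]
  | c :: rest =>
      if PySem.Chars.isspace c then
        (if buf.isEmpty then wsW rest [] else buf :: wsW rest [])
      else wsW rest (buf ++ [c])

lemma wsW_go (s : List Char) : ∀ (cur : List Char) (acc : List (List Char)),
    PySem.Chars.split₀.go s cur acc = acc.reverse ++ wsW s cur.reverse := by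
  induction s with
  | nil =>
    intro cur acc
    simp only [PySem.Chars.split₀.go, wsW]
    by_cases h : cur.isEmpty
    · simp [List.isEmpty_iff.mp h]
    · have : cur.reverse.isEmpty = false := by
        simp [List.isEmpty_iff] at h ⊢; exact h
      simp [h, this]
  | cons c rest ih =>
    intro cur acc
    simp only [PySem.Chars.split₀.go, wsW]
    by_cases hs : PySem.Chars.isspace c
    · by_cases h : cur.isEmpty
      · simp [hs, List.isEmpty_iff.mp h, ih]
      · have hrf : cur.reverse.isEmpty = false := by
          simp [List.isEmpty_iff] at h ⊢; exact h
        simp [hs, h, hrf, ih]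
    · simp [hs, ih]

lemma split₀_eq_wsW (s : List Char) : PySem.Chars.split₀ s = wsW s [] := by
  show PySem.Chars.split₀.go s [] [] = _
  simpa using wsW_go s [] []

lemma wsW_eq_fold (s : List Char) : ∀ toks buf,
    toks ++ wsW s buf = wsFinish (s.foldl wsT (toks, buf)) := by
  induction s with
  | nil => intro toks buf; by_cases h : buf.isEmpty <;> simp [wsW, wsFinish, h]
  | cons c rest ih =>
    intro toks buf
    simp only [wsW, List.foldl_cons, wsT]
    by_cases hs : PySem.Chars.isspace c
    · by_cases h : buf.isEmpty
      · simp [hs, h, ih]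
      · simp only [hs, h, if_true, if_false, Bool.false_eq_true]
        rw [← ih (toks ++ [buf]) []]
        simp
    · simp [hs, ih]

-- ''.join with empty separator is flatten
lemma join_empty_sep (l : List (List Char)) : PySem.Chars.join [] l = l.flatten := by
  induction l with
  | nil => rfl
  | cons a t ih =>
    cases t with
    | nil => simp [PySem.Chars.join_singleton]
    | cons b r => rw [PySem.Chars.join_cons_cons, ih]; simp

-- folding the split machine over one of A's pieces is exactly one step of B's loop
lemma piece_fold (cs : List Char) (st : List (List Char) × List Char) (p : Int × Char) :
    (fhPiece cs p.1 p.2).foldl wsT st = fhStep cs st p := by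
  unfold fhPiece fhStep
  by_cases hu : fhUnary cs p.1 p.2
  · have hch : p.2 = '-' := by
      unfold fhUnary at hu
      by_cases h : p.2 = '-'
      · exact h
      · simp [h] at hu
    have h1 : PySem.Chars.isspace '-' = false := by decide
    rw [hch] at hu ⊢
    simp [hu, wsT, h1]
  · by_cases hop : "+-*/()".toList.contains p.2
    · have hm : p.2 ∈ "+-*/()".toList := by simpa using hop
      have hop' : p.2 = '+' ∨ p.2 = '-' ∨ p.2 = '*' ∨ p.2 = '/' ∨ p.2 = '(' ∨ p.2 = ')' := by
        simpa using hm
      have hns : PySem.Chars.isspace p.2 = false := by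
        rcases hop' with h|h|h|h|h|h <;> rw [h] <;> decide
      have hsp : PySem.Chars.isspace ' ' = true := by decide
      by_cases hb : st.2 = []
      · simp [hu, hop', wsT, hns, hsp, hb]
      · simp [hu, hop', wsT, hns, hsp, hb]
    · have hop'' : ¬ (p.2 = '+' ∨ p.2 = '-' ∨ p.2 = '*' ∨ p.2 = '/' ∨ p.2 = '(' ∨ p.2 = ')') := by
        simpa using hop
      by_cases hs : PySem.Chars.isspace p.2
      · simp [hu, hop'', wsT, hs]
      · simp [hu, hop'', wsT, hs]

-- ===== VERDICT (by name: the statement is the Claim_ definition above) =====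
theorem format_for_history_spec : Claim_equal_format_for_history := by
  intro expr _
  unfold Spec_format_for_history format_for_history format_for_history_alt
  simp only [PySem.List.foldl_append_singleton_eq_map, List.nil_append]
  rw [join_empty_sep, split₀_eq_wsW]
  rw [show wsW ((PySem.List.enumerate expr.toList 0).map
        (fun p => fhPiece expr.toList p.1 p.2)).flatten [] =
      [] ++ wsW ((PySem.List.enumerate expr.toList 0).map
        (fun p => fhPiece expr.toList p.1 p.2)).flatten [] from (List.nil_append _).symm]
  rw [wsW_eq_fold, List.foldl_flatten, List.foldl_map]
  simp only [piece_fold]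
  rfl
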